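-- pv_equiv track=rewrite | github.com/Wiglol/Computer_Main_Centre_Public | path_index_local.py | _expand_terms
-- ===== SOURCE A (Python) =====
-- from typing import List, Dict, Any
--
-- _SYNONYMS: Dict[str, List[str]] = {
--     "server": ["servers", "srv", "instance", "world"],
--     "servers": ["server", "srv", "instance", "world"],
--     "atlauncher": ["atlauncher", "launcher"],
-- }
--
-- def _expand_terms(terms: List[str]) -> List[str]:
--     out: List[str] = []
--     seen = set()
--     for t in terms:
--         if t not in seen:
--             seen.add(t)
--             out.append(t)
--         for syn in _SYNONYMS.get(t, []):
--             if syn not in seen: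
--                 seen.add(syn)
--                 out.append(syn)
--     return out
-- ===== SOURCE B (Python) =====
-- from typing import List, Dict
--
-- _SYNONYMS: Dict[str, List[str]] = {
--     "server": ["servers", "srv", "instance", "world"],
--     "servers": ["server", "srv", "instance", "world"],
--     "atlauncher": ["atlauncher", "launcher"],
-- }
--
-- def _expand_terms(terms: List[str]) -> List[str]:
--     # Phase 1: flatten each term with its synonyms (duplicates allowed).
--     candidates = [x for t in terms for x in [t] + _SYNONYMS.get(t, [])]
--     # Phase 2: order-preserving dedup by repeated filtering, with no 'seen'
--     # structure: take the front element, then filter all of its later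
--     # duplicates out of the remainder before the next round.
--     out: List[str] = []
--     rest = candidates
--     while rest:
--         x = rest[0]
--         out.append(x)
--         rest = [y for y in rest[1:] if y != x]
--     return out
-- ===== Notes on version B (the rewrite author's own statement) =====
-- stated objective: alternative
-- what changed: Replaces the single interleaved pass carrying a 'seen' set with a flatten phase followed by a repeated-filtering dedup loop that keeps no auxiliary state: take the front element, filter all of its later duplicates out of the remainder, repeat.
import Mathlib
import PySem

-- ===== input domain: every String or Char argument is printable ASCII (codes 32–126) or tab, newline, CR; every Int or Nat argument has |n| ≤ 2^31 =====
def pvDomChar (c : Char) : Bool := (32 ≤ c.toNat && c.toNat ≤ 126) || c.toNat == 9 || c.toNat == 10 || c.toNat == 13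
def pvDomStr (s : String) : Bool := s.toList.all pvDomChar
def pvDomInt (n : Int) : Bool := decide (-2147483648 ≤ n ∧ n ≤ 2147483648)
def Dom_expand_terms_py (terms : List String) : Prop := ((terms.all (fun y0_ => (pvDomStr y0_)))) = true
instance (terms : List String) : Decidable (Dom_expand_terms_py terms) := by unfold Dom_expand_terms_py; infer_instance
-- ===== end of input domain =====

-- B changes the algorithm's structure: flatten all terms with their synonyms first, then
-- deduplicate by repeated filtering (take the front element, filter its duplicates out of
-- the rest) with no auxiliary 'seen' structure; same output, quadratic instead of linear.

-- module constant _SYNONYMS (shared context of A and B)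
def pySynonyms : PySem.Dict String (List String) :=
  PySem.Dict.ofList
    [("server", ["servers", "srv", "instance", "world"]),
     ("servers", ["server", "srv", "instance", "world"]),
     ("atlauncher", ["atlauncher", "launcher"])]

-- ===== PORT A =====
-- one step of A's body: 'if x not in seen: seen.add(x); out.append(x)'
def pyAStep (st : List String × PySem.Set String) (x : String) : List String × PySem.Set String :=
  if PySem.Set.contains st.2 x then st else (st.1 ++ [x], PySem.Set.add st.2 x)

def expand_terms_py (terms : List String) : List String :=
  (terms.foldl
    (fun st t => (pySynonyms.getD t []).foldl pyAStep (pyAStep st t))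
    ([], PySem.Set.empty)).1

-- ===== PORT B =====
-- B's while loop: out.append(rest[0]); rest = [y for y in rest[1:] if y != rest[0]]
def pyBLoop (out : List String) : List String → List String
  | [] => out
  | x :: rest => pyBLoop (out ++ [x]) (rest.filter (fun y => y ≠ x))
termination_by rest => rest.length
decreasing_by
  simp only [List.length_unattach]
  exact Nat.lt_succ_of_le (le_trans (List.length_filter_le _ _) (by simp))

def expand_terms_py_alt (terms : List String) : List String :=
  -- phase 1: [x for t in terms for x in [t] + _SYNONYMS.get(t, [])]
  let candidates := terms.flatMap (fun t => t :: pySynonyms.getD t [])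
  -- phase 2: order-preserving dedup by repeated filtering
  pyBLoop [] candidates

-- ===== PRECONDITION & SPEC =====
def Spec_expand_terms_py (terms : List String) (out : List String) : Prop := out = expand_terms_py_alt terms
instance (terms : List String) (out : List String) : Decidable (Spec_expand_terms_py terms out) := by unfold Spec_expand_terms_py; infer_instance

-- ===== CLAIM (what is proved, stated in full; the proofs are below) =====
def Claim_equal_expand_terms_py : Prop := ∀ (terms : List String), Dom_expand_terms_py terms → Spec_expand_terms_py terms (expand_terms_py terms)

-- ===== LEMMAS AND PROOFS =====

theorem pyBLoop_nil (out : List String) : pyBLoop out [] = out := by rw [pyBLoop]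

theorem pyBLoop_cons (out : List String) (x : String) (xs : List String) :
    pyBLoop out (x :: xs) = pyBLoop (out ++ [x]) (xs.filter (fun y => y ≠ x)) := by
  rw [pyBLoop]

-- A's per-term step (t, then its synonyms) is a fold of pyAStep over the flattened list
theorem a_eq_flat (terms : List String) (st : List String × PySem.Set String) :
    terms.foldl (fun st t => (pySynonyms.getD t []).foldl pyAStep (pyAStep st t)) st
      = (terms.flatMap (fun t => t :: pySynonyms.getD t [])).foldl pyAStep st := by
  induction terms generalizing st with
  | nil => rfl
  | cons t ts ih => simp [List.foldl_cons, List.foldl_append, ih]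

-- on a state whose two components are the same list, pyAStep is Set.add on both
theorem fold_step_diag (xs : List String) (s : List String) :
    xs.foldl pyAStep (s, s) = (xs.foldl PySem.Set.add s, xs.foldl PySem.Set.add s) := by
  induction xs generalizing s with
  | nil => rfl
  | cons x xs ih =>
    have h : pyAStep (s, s) x = (PySem.Set.add s x, PySem.Set.add s x) := by
      simp only [pyAStep, PySem.Set.add, PySem.Set.contains]
      split <;> simp_all
    simp [List.foldl_cons, h, ih]

-- A's seen-set fold from a prefix s equals B's filter loop on the not-yet-seen candidates
theorem foldl_add_eq_loop (xs : List String) (s : List String) :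
    xs.foldl PySem.Set.add s = pyBLoop s (xs.filter (fun y => y ∉ s)) := by
  induction xs generalizing s with
  | nil => simp [pyBLoop_nil]
  | cons x xs ih =>
    have hadd : PySem.Set.add s x = if x ∈ s then s else s ++ [x] := by
      simp [PySem.Set.add, PySem.Set.contains]
    by_cases hx : x ∈ s
    · simp [List.foldl_cons, hx, ih]
    · have hfil : (xs.filter (fun y => y ∉ s ++ [x]))
          = (xs.filter (fun y => y ∉ s)).filter (fun y => y ≠ x) := by
        rw [List.filter_filter]
        apply List.filter_congr
        intro y _
        by_cases hy : y = x <;> by_cases hys : y ∈ s <;> simp_all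
      have hc : List.filter (fun y => decide (y ∉ s)) (x :: xs)
          = x :: List.filter (fun y => decide (y ∉ s)) xs := by simp [hx]
      rw [List.foldl_cons, hadd, if_neg hx, ih, hfil, hc, pyBLoop_cons]

-- ===== VERDICT (by name: the statement is the Claim_ definition above) =====
theorem expand_terms_py_spec : Claim_equal_expand_terms_py := by
  intro terms _
  unfold Spec_expand_terms_py expand_terms_py expand_terms_py_alt
  rw [a_eq_flat]
  have hset : (PySem.Set.empty : PySem.Set String) = ([] : List String) := rfl
  rw [hset, fold_step_diag, foldl_add_eq_loop]
  simp
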